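-- pv_equiv track=rewrite | github.com/NathanKe/AdventPython | 2023/17_answer.py | diff_runs
-- ===== SOURCE A (Python) =====
-- def diff_runs(i_path):
--     diff_run_arr = []
--     diffs = [i_path[i + 1] - i_path[i] for i in range(len(i_path[:-1]))]
--
--     left = diffs[0]
--     cur_count = 1
--     for d_n, d_v in enumerate(diffs[1:]):
--         if d_v == left:
--             cur_count += 1
--         else:
--             diff_run_arr.append(cur_count)
--             cur_count = 1
--         left = d_v
--     diff_run_arr.append(cur_count)
--
--     return diff_run_arr
-- ===== SOURCE B (Python) =====
-- def diff_runs(i_path):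
--     diffs = [i_path[k + 1] - i_path[k] for k in range(len(i_path) - 1)]
--     if not diffs:
--         return []
--     cuts = [k for k in range(1, len(diffs)) if diffs[k] != diffs[k - 1]]
--     cuts = [0] + cuts + [len(diffs)]
--     return [b - a for a, b in zip(cuts, cuts[1:])]
-- ===== Notes on version B (the rewrite author's own statement) =====
-- stated objective: alternative
-- what changed: A run-length-encodes the diff list in one scan carrying (left, cur_count) accumulator state; B is a staged two-phase computation: it first collects the list of boundary indices where a diff differs from its predecessor, then returns the gaps between consecutive entries of [0] + boundaries + [len(diffs)] -- no counter or previous-value state is carried.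
-- crash fix: On paths of length <= 1 the diffs list is empty and A raises IndexError at diffs[0]; B returns []. — e.g. on diff_runs([5]): A raises IndexError, B returns []
import Mathlib
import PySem

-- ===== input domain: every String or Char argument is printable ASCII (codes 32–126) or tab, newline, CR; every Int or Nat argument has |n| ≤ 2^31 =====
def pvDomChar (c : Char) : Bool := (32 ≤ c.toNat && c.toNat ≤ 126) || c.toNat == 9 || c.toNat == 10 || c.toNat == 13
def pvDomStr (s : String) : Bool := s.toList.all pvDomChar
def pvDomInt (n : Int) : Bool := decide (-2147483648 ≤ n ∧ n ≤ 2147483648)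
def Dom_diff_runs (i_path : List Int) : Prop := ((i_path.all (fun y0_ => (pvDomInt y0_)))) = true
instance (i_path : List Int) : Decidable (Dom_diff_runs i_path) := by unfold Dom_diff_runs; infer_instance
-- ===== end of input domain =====

-- B replaces A's single accumulator scan by a staged computation: collect the boundary
-- indices where a diff differs from its predecessor, then return the gaps between
-- consecutive boundaries; an alternative decomposition of the same cost.

-- ===== PORT A =====
-- diffs comprehension: indices i and i+1 are always in range (i < len-1), so pyGetD is exact here
def diff_runs (i_path : List Int) : List Int :=
  let diffs := (PySem.List.pyRange 0 ((PySem.List.slice i_path none (some (-1))).length : Int) 1).map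
      (fun i => PySem.List.pyGetD i_path (i + 1) 0 - PySem.List.pyGetD i_path i 0)
  -- left = diffs[0]: Python raises IndexError when diffs is empty; those inputs are outside Pre_
  match PySem.List.pyGet? diffs 0 with
  | none => []
  | some d0 =>
    let s := (PySem.List.enumerate (PySem.List.slice diffs (some 1) none) 0).foldl
      (fun (s : List Int × Int × Int) dv =>
        if dv.2 == s.2.2 then (s.1, s.2.1 + 1, dv.2)
        else (s.1 ++ [s.2.1], 1, dv.2)) ([], 1, d0)
    s.1 ++ [s.2.1]

-- ===== PORT B =====
-- staged: diffs comprehension, then boundary indices (cuts), then gaps of [0]+cuts+[n];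
-- indices k and k-1 of the cuts comprehension are always in range, so pyGetD is exact
def diff_runs_alt (i_path : List Int) : List Int :=
  let diffs := (PySem.List.pyRange 0 ((i_path.length : Int) - 1) 1).map
      (fun i => PySem.List.pyGetD i_path (i + 1) 0 - PySem.List.pyGetD i_path i 0)
  if diffs = [] then []
  else
    let cuts := (PySem.List.pyRange 1 (diffs.length : Int) 1).filter
      (fun k => !(PySem.List.pyGetD diffs k 0 == PySem.List.pyGetD diffs (k - 1) 0))
    let cuts2 := 0 :: cuts ++ [(diffs.length : Int)]
    (cuts2.zip (PySem.List.slice cuts2 (some 1) none)).map (fun ab => ab.2 - ab.1)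

-- ===== PRECONDITION & SPEC =====
-- Pre_ excludes paths of length ≤ 1, on which A raises IndexError (diffs is empty at diffs[0])
def Pre_diff_runs (i_path : List Int) : Prop := 2 ≤ i_path.length
instance (i_path : List Int) : Decidable (Pre_diff_runs i_path) := by unfold Pre_diff_runs; infer_instance
def pvWitness_diff_runs : List Int := [0, 1, 2]

-- On paths of length ≤ 1 the diffs list is empty and A raises IndexError at diffs[0]; B returns []
def Raises_diff_runs (i_path : List Int) : Prop := i_path.length ≤ 1
instance (i_path : List Int) : Decidable (Raises_diff_runs i_path) := by unfold Raises_diff_runs; infer_instance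
def pvRaiseWitness_diff_runs : List Int := [5]
def pvRaiseWitnessOut_diff_runs : List Int := []

def Spec_diff_runs (i_path : List Int) (out : List Int) : Prop := out = diff_runs_alt i_path
instance (i_path : List Int) (out : List Int) : Decidable (Spec_diff_runs i_path out) := by unfold Spec_diff_runs; infer_instance

-- ===== CLAIM (what is proved, stated in full; the proofs are below) =====
def Claim_equal_diff_runs : Prop := ∀ (i_path : List Int), Dom_diff_runs i_path → Pre_diff_runs i_path → Spec_diff_runs i_path (diff_runs i_path)
def Claim_raises_diff_runs : Prop := (∀ (i_path : List Int), Dom_diff_runs i_path → Raises_diff_runs i_path → ¬ Pre_diff_runs i_path) ∧ (Dom_diff_runs (pvRaiseWitness_diff_runs) ∧ Raises_diff_runs (pvRaiseWitness_diff_runs) ∧ diff_runs_alt (pvRaiseWitness_diff_runs) = pvRaiseWitnessOut_diff_runs)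

-- ===== LEMMAS AND PROOFS =====

-- run lengths of maximal blocks of equal elements: the common spec both ports are reduced to
def pyRunsOf : List Int → List Int
  | [] => []
  | x :: xs =>
      (1 + ((xs.takeWhile (· == x)).length : Int)) :: pyRunsOf (xs.dropWhile (· == x))
  termination_by l => l.length
  decreasing_by
    simpa using Nat.lt_succ_of_le (List.length_dropWhile_le _ _)

-- A's loop body as a structural recursion over the remaining diffs
def rlA : Int → Int → List Int → List Int
  | _, cur, [] => [cur]
  | left, cur, d :: ds => if d == left then rlA d (cur + 1) ds else cur :: rlA d 1 ds

theorem foldA_eq_rlA (ds : List Int) : ∀ (arr : List Int) (cur left : Int),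
    (let s := ds.foldl (fun (s : List Int × Int × Int) (dv : Int) =>
        if dv == s.2.2 then (s.1, s.2.1 + 1, dv)
        else (s.1 ++ [s.2.1], 1, dv)) (arr, cur, left)
     s.1 ++ [s.2.1]) = arr ++ rlA left cur ds := by
  induction ds with
  | nil => intro arr cur left; simp [rlA]
  | cons d ds ih =>
      intro arr cur left
      simp only [List.foldl_cons, rlA]
      by_cases h : d = left
      · subst h
        simp only [beq_self_eq_true, if_true]
        exact ih arr (cur + 1) d
      · have hb : (d == left) = false := beq_false_of_ne h
        simp only [hb, Bool.false_eq_true, if_false]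
        rw [ih (arr ++ [cur]) 1 d]
        simp

theorem foldl_enumerate_snd {σ : Type} (xs : List Int) : ∀ (s : Int) (init : σ)
    (g : σ → Int → σ),
    (PySem.List.enumerate xs s).foldl (fun acc p => g acc p.2) init = xs.foldl g init := by
  induction xs with
  | nil => intro s init g; simp [PySem.List.enumerate_nil]
  | cons x xs ih => intro s init g; simp [PySem.List.enumerate_cons, ih]

theorem rlA_eq_runs (ds : List Int) : ∀ (x c : Int),
    rlA x c ds = (c + ((ds.takeWhile (· == x)).length : Int)) :: pyRunsOf (ds.dropWhile (· == x)) := by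
  induction ds with
  | nil => intro x c; simp [rlA, pyRunsOf]
  | cons d ds ih =>
      intro x c
      by_cases h : d = x
      · subst h
        simp only [rlA, beq_self_eq_true, if_true, List.takeWhile_cons, List.dropWhile_cons]
        rw [ih d (c + 1)]
        simp only [List.cons.injEq]
        refine ⟨?_, trivial⟩
        push_cast [List.length_cons]
        ring
      · have hb : (d == x) = false := beq_false_of_ne h
        simp only [rlA, hb, Bool.false_eq_true, if_false, List.takeWhile_cons, List.dropWhile_cons]
        rw [ih d 1]
        simp [pyRunsOf]

-- both diffs comprehensions denote the same list
theorem diffs_eq (p : List Int) :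
    (PySem.List.pyRange 0 ((PySem.List.slice p none (some (-1))).length : Int) 1).map
      (fun i => PySem.List.pyGetD p (i + 1) 0 - PySem.List.pyGetD p i 0)
    = (PySem.List.pyRange 0 ((p.length : Int) - 1) 1).map
      (fun i => PySem.List.pyGetD p (i + 1) 0 - PySem.List.pyGetD p i 0) := by
  rw [PySem.List.slice_to_neg_one, PySem.List.pyRange_one, PySem.List.pyRange_one]
  have hl : p.dropLast.length = p.length - 1 := List.length_dropLast
  have h : ((p.dropLast.length : Int) - 0).toNat = (((p.length : Int) - 1) - 0).toNat := by
    rw [hl]; omega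
  rw [h]

-- B's cuts, over Nat indices (i + 1 is the boundary index)
def cutsN (ds : List Int) : List Nat :=
  ((List.range (ds.length - 1)).filter
      (fun i => !(ds.getD (i + 1) 0 == ds.getD i 0))).map (fun i => i + 1)

-- gaps between consecutive elements
def gaps (l : List Int) : List Int := (l.zip l.tail).map (fun ab => ab.2 - ab.1)

theorem gaps_cons_cons (a b : Int) (l : List Int) :
    gaps (a :: b :: l) = (b - a) :: gaps (b :: l) := by
  simp [gaps]

theorem gaps_map_add_one (l : List Int) : gaps (l.map (· + 1)) = gaps l := by
  induction l with
  | nil => simp [gaps]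
  | cons a l ih =>
      cases l with
      | nil => simp [gaps]
      | cons b l' =>
          rw [List.map_cons, List.map_cons, gaps_cons_cons, gaps_cons_cons a b l']
          have hm : ((b : Int) + 1) :: l'.map (· + 1) = (b :: l').map (· + 1) := by simp
          rw [hm, ih]
          congr 1
          ring

theorem cutsN_cons (x y : Int) (rest : List Int) :
    cutsN (x :: y :: rest) = (if y = x then [] else [1]) ++ (cutsN (y :: rest)).map (· + 1) := by
  unfold cutsN
  simp only [List.length_cons, Nat.add_sub_cancel]
  rw [List.range_succ_eq_map, List.filter_cons, List.filter_map]
  have hpred : ((fun i => !((x :: y :: rest).getD (i + 1) 0 == (x :: y :: rest).getD i 0)) ∘ Nat.succ)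
      = (fun i => !((y :: rest).getD (i + 1) 0 == (y :: rest).getD i 0)) := by
    funext i
    simp [Function.comp]
  rw [hpred]
  by_cases h : y = x
  · subst h
    simp [List.map_map, Function.comp_def, Nat.succ_eq_add_one]
  · have hb : (y == x) = false := beq_false_of_ne h
    simp [hb, h, List.map_map, Function.comp_def, Nat.succ_eq_add_one]

theorem pyRunsOf_cons_eq (x : Int) (rest : List Int) :
    pyRunsOf (x :: x :: rest)
      = (match pyRunsOf (x :: rest) with
         | [] => []
         | g :: gs => (g + 1) :: gs) := by
  rw [pyRunsOf, pyRunsOf]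
  simp only [List.takeWhile_cons, beq_self_eq_true, List.dropWhile_cons, if_true]
  simp only [List.length_cons]
  push_cast
  ring_nf

theorem gaps_cuts (ds : List Int) (h : ds ≠ []) :
    gaps (0 :: (cutsN ds).map (fun k : Nat => (k : Int)) ++ [(ds.length : Int)]) = pyRunsOf ds := by
  induction ds with
  | nil => exact absurd rfl h
  | cons x t ih =>
      cases t with
      | nil =>
          simp [cutsN, gaps, pyRunsOf]
      | cons y rest =>
          have IH0 := ih (by simp)
          simp only [List.cons_append] at IH0 ⊢
          have hne : (cutsN (y :: rest)).map (fun k : Nat => (k : Int)) ++ [((y :: rest).length : Int)] ≠ [] := by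
            simp
          obtain ⟨a, l, hal⟩ := List.exists_cons_of_ne_nil hne
          have IH := IH0
          rw [hal] at IH
          rw [gaps_cons_cons] at IH
          rw [cutsN_cons]
          have hmapmap : ((cutsN (y :: rest)).map (· + 1)).map (fun k : Nat => (k : Int))
              = ((cutsN (y :: rest)).map (fun k : Nat => (k : Int))).map (· + 1) := by
            simp [List.map_map, Function.comp_def]
          by_cases hxy : y = x
          · subst hxy
            rw [if_pos rfl, List.nil_append, hmapmap]
            have hlist : (0 : Int) :: (((cutsN (y :: rest)).map (fun k : Nat => (k : Int))).map (· + 1)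
                  ++ [((y :: y :: rest).length : Int)])
                = 0 :: (((cutsN (y :: rest)).map (fun k : Nat => (k : Int))
                    ++ [((y :: rest).length : Int)]).map (· + 1)) := by
              simp
            have hmc : ((a + 1) :: l.map (· + 1)) = (a :: l).map (· + 1) := by simp
            rw [hlist, hal, List.map_cons, gaps_cons_cons, hmc,
              gaps_map_add_one, pyRunsOf_cons_eq, ← IH]
            congr 1
            ring
          · rw [if_neg hxy, List.map_append, hmapmap]
            have hlist : (0 : Int) :: (([1].map (fun k : Nat => (k : Int))
                    ++ ((cutsN (y :: rest)).map (fun k : Nat => (k : Int))).map (· + 1))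
                  ++ [((x :: y :: rest).length : Int)])
                = 0 :: 1 :: ((((cutsN (y :: rest)).map (fun k : Nat => (k : Int))
                    ++ [((y :: rest).length : Int)]).map (· + 1))) := by
              simp
            have hshift : (1 : Int) :: (((cutsN (y :: rest)).map (fun k : Nat => (k : Int))
                    ++ [((y :: rest).length : Int)]).map (· + 1))
                = (((0 : Int) :: ((cutsN (y :: rest)).map (fun k : Nat => (k : Int))
                    ++ [((y :: rest).length : Int)])).map (· + 1)) := by
              simp
            rw [hlist, gaps_cons_cons, hshift, gaps_map_add_one, IH0]
            have htw : (y :: rest).takeWhile (· == x) = [] := by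
              simp [beq_false_of_ne hxy]
            have hdw : (y :: rest).dropWhile (· == x) = y :: rest := by
              simp [beq_false_of_ne hxy]
            conv_rhs => rw [pyRunsOf]
            rw [htw, hdw]
            norm_num

-- B's Int cuts equal cutsN cast to Int
theorem cuts_bridge (ds : List Int) :
    (PySem.List.pyRange 1 (ds.length : Int) 1).filter
        (fun k => !(PySem.List.pyGetD ds k 0 == PySem.List.pyGetD ds (k - 1) 0))
    = (cutsN ds).map (fun k : Nat => (k : Int)) := by
  rw [PySem.List.pyRange_one]
  have hn : (((ds.length : Int)) - 1).toNat = ds.length - 1 := by omega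
  rw [hn, List.filter_map]
  unfold cutsN
  rw [List.map_map]
  have hfilter : (List.range (ds.length - 1)).filter
        ((fun k : Int => !(PySem.List.pyGetD ds k 0 == PySem.List.pyGetD ds (k - 1) 0))
          ∘ (fun k : Nat => (1 : Int) + k))
      = (List.range (ds.length - 1)).filter (fun i => !(ds.getD (i + 1) 0 == ds.getD i 0)) := by
    apply List.filter_congr
    intro i hi
    have hi' : i < ds.length - 1 := List.mem_range.mp hi
    simp only [Function.comp]
    have e1 : PySem.List.pyGetD ds ((1 : Int) + i) 0 = ds[i + 1]'(by omega) := by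
      have := PySem.List.pyGetD_eq_getElem (xs := ds) (i := (1 : Int) + i) (d := 0)
        (by omega) (by omega)
      simpa [show ((1 : Int) + i).toNat = i + 1 by omega] using this
    have e2 : PySem.List.pyGetD ds ((1 : Int) + i - 1) 0 = ds[i]'(by omega) := by
      have := PySem.List.pyGetD_eq_getElem (xs := ds) (i := (1 : Int) + i - 1) (d := 0)
        (by omega) (by omega)
      simpa [show ((1 : Int) + i - 1).toNat = i by omega] using this
    rw [e1, e2, List.getD_eq_getElem ds 0 (by omega), List.getD_eq_getElem ds 0 (by omega)]
  rw [hfilter]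
  apply List.map_congr_left
  intro a _
  simp only [Function.comp]
  push_cast
  ring

-- ===== VERDICT (by name: the statement is the Claim_ definition above) =====
theorem diff_runs_spec : Claim_equal_diff_runs := by
  intro p _ hpre
  unfold Spec_diff_runs diff_runs diff_runs_alt
  rw [diffs_eq]
  set diffs := (PySem.List.pyRange 0 ((p.length : Int) - 1) 1).map
      (fun i => PySem.List.pyGetD p (i + 1) 0 - PySem.List.pyGetD p i 0) with hd
  have hlen : diffs.length = p.length - 1 := by
    rw [hd, List.length_map, PySem.List.length_pyRange_one]
    omega
  have hne : diffs ≠ [] := by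
    have h2 : 2 ≤ p.length := hpre
    intro hnil
    rw [hnil] at hlen
    simp at hlen
    omega
  rw [if_neg hne, cuts_bridge]
  have hgaps : ((((0 : Int) :: (cutsN diffs).map (fun k : Nat => (k : Int)) ++ [(diffs.length : Int)]).zip
        (PySem.List.slice ((0 : Int) :: (cutsN diffs).map (fun k : Nat => (k : Int)) ++ [(diffs.length : Int)]) (some 1) none)).map
      (fun ab => ab.2 - ab.1))
      = gaps ((0 : Int) :: (cutsN diffs).map (fun k : Nat => (k : Int)) ++ [(diffs.length : Int)]) := by
    rw [PySem.List.slice_from_one]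
    rfl
  rw [hgaps, gaps_cuts diffs hne]
  obtain ⟨d0, rest, hcons⟩ := List.exists_cons_of_ne_nil hne
  rw [hcons]
  simp only [PySem.List.pyGet?_zero_cons]
  rw [PySem.List.slice_from_one]
  simp only [List.tail_cons]
  rw [foldl_enumerate_snd rest 0 ([], 1, d0)
    (fun (s : List Int × Int × Int) (dv : Int) =>
      if dv == s.2.2 then (s.1, s.2.1 + 1, dv) else (s.1 ++ [s.2.1], 1, dv))]
  rw [foldA_eq_rlA rest [] 1 d0, rlA_eq_runs rest d0 1]
  simp [pyRunsOf]

@[simp] theorem diff_runs_raises : Claim_raises_diff_runs := by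
  unfold Claim_raises_diff_runs
  constructor
  · intro p _ hr hpre
    unfold Raises_diff_runs at hr
    unfold Pre_diff_runs at hpre
    omega
  · exact ⟨by decide, by decide, by decide⟩
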